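-- pv_equiv track=rewrite | github.com/dlcks7456/decipher-package | User/additional.py | selectUnique
-- ===== SOURCE A (Python) =====
-- def selectUnique(qlabel,rowLabels,colLabels,option) :
--     uniqueSyntax = ''
--     dupchk = "!DUPCHK %s.\n"
--     if option == 'cols' :
--         uniqueList = []
--         if colLabels :
--             for c in colLabels :
--                 for r in rowLabels :
--                     saLabel = '%s%s%s'%(qlabel,r,c)
--                     uniqueList.append(saLabel)
--
--                 setVars = '%s TO %s'%(uniqueList[0],uniqueList[-1])
--                 uniqueSyntax += dupchk%setVars
--         else :
--             for r in rowLabels :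
--                 saLabel = '%s%s'%(qlabel,r)
--                 uniqueList.append(saLabel)
--
--             setVars = '%s TO %s'%(uniqueList[0],uniqueList[-1])
--             uniqueSyntax += dupchk%setVars
--
--     if option == 'rows' :
--         uniqueList = []
--         if rowLabels :
--             for r in rowLabels :
--                 for c in colLabels :
--                     saLabel = '%s%s%s'%(qlabel,r,c)
--                     uniqueList.append(saLabel)
--
--                 setVars = '%s TO %s'%(uniqueList[0],uniqueList[-1])
--                 uniqueSyntax += dupchk%setVars
--         else :
--             for c in colLabels :
--                 saLabel = '%s%s'%(qlabel,c)
--                 uniqueList.append(saLabel)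
--
--             setVars = '%s TO %s'%(uniqueList[0],uniqueList[-1])
--             uniqueSyntax += dupchk%setVars
--
--
--     return uniqueSyntax
-- ===== SOURCE B (Python) =====
-- def selectUnique(qlabel, rowLabels, colLabels, option):
--     # Closed form: every range starts at the globally-first label; only the last
--     # label varies per outer element, so no full label list is built.
--     parts = []
--     if option == 'cols':
--         if colLabels:
--             first = qlabel + rowLabels[0] + colLabels[0]
--             tail = qlabel + rowLabels[-1]
--             parts = ["!DUPCHK %s TO %s%s.\n" % (first, tail, c) for c in colLabels]
--         else:
--             parts = ["!DUPCHK %s%s TO %s%s.\n" % (qlabel, rowLabels[0], qlabel, rowLabels[-1])]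
--     elif option == 'rows':
--         if rowLabels:
--             first = qlabel + rowLabels[0] + colLabels[0]
--             last = colLabels[-1]
--             parts = ["!DUPCHK %s TO %s%s%s.\n" % (first, qlabel, r, last) for r in rowLabels]
--         else:
--             parts = ["!DUPCHK %s%s TO %s%s.\n" % (qlabel, colLabels[0], qlabel, colLabels[-1])]
--     return ''.join(parts)
-- ===== Notes on version B (the rewrite author's own statement) =====
-- stated objective: alternative
-- what changed: B replaces A's nested loops that materialise the full rows*cols label list (re-reading its fixed first element each outer pass) by closed-form first/last labels computed once per outer element, emitting each DUPCHK line directly.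
import Mathlib
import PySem

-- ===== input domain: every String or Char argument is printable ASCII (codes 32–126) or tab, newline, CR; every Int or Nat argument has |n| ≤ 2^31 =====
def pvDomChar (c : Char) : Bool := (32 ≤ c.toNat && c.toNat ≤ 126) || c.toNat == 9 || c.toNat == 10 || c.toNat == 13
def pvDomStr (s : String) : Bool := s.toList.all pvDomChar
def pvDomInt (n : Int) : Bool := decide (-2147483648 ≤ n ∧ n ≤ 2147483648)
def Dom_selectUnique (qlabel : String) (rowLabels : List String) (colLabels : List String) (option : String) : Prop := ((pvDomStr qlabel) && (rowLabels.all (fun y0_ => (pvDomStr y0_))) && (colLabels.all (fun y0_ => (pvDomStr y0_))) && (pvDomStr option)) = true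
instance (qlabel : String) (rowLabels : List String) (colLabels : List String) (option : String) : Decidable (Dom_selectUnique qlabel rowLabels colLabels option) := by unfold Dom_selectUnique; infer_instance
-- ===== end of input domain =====

-- B replaces A's label-list accumulation by closed-form first/last labels per outer element
-- (objective: alternative, avoids building the full label list); equivalence proved on Pre_ (A raises IndexError outside it).

-- ===== PORT A =====
-- literal transliteration of A: nested loops accumulating `uniqueList`; uniqueList[0]/[-1] via
-- PySem.List.pyGet? (none = IndexError, excluded by Pre_; .getD "" is never reached inside Pre_)
def selectUnique (qlabel : String) (rowLabels : List String) (colLabels : List String) (option : String) : String :=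
  if option = "cols" then
    if colLabels ≠ [] then
      (colLabels.foldl (fun (st : List String × String) c =>
        let ul := rowLabels.foldl (fun u r => u ++ [qlabel ++ r ++ c]) st.1
        let setVars := ((PySem.List.pyGet? ul 0).getD "") ++ " TO " ++ ((PySem.List.pyGet? ul (-1)).getD "")
        (ul, st.2 ++ ("!DUPCHK " ++ setVars ++ ".\n"))) ([], "")).2
    else
      let ul := rowLabels.foldl (fun u r => u ++ [qlabel ++ r]) []
      let setVars := ((PySem.List.pyGet? ul 0).getD "") ++ " TO " ++ ((PySem.List.pyGet? ul (-1)).getD "")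
      "" ++ ("!DUPCHK " ++ setVars ++ ".\n")
  else if option = "rows" then
    if rowLabels ≠ [] then
      (rowLabels.foldl (fun (st : List String × String) r =>
        let ul := colLabels.foldl (fun u c => u ++ [qlabel ++ r ++ c]) st.1
        let setVars := ((PySem.List.pyGet? ul 0).getD "") ++ " TO " ++ ((PySem.List.pyGet? ul (-1)).getD "")
        (ul, st.2 ++ ("!DUPCHK " ++ setVars ++ ".\n"))) ([], "")).2
    else
      let ul := colLabels.foldl (fun u c => u ++ [qlabel ++ c]) []
      let setVars := ((PySem.List.pyGet? ul 0).getD "") ++ " TO " ++ ((PySem.List.pyGet? ul (-1)).getD "")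
      "" ++ ("!DUPCHK " ++ setVars ++ ".\n")
  else ""

-- ===== PORT B =====
-- literal transliteration of Source B: closed-form first/last labels, one map over the outer list, join
def selectUnique_alt (qlabel : String) (rowLabels : List String) (colLabels : List String) (option : String) : String :=
  let g := fun (xs : List String) (i : Int) => (PySem.List.pyGet? xs i).getD ""
  let parts : List String :=
    if option = "cols" then
      if colLabels ≠ [] then
        let first := qlabel ++ g rowLabels 0 ++ g colLabels 0
        let tail := qlabel ++ g rowLabels (-1)
        colLabels.map (fun c => "!DUPCHK " ++ first ++ " TO " ++ tail ++ c ++ ".\n")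
      else
        ["!DUPCHK " ++ qlabel ++ g rowLabels 0 ++ " TO " ++ qlabel ++ g rowLabels (-1) ++ ".\n"]
    else if option = "rows" then
      if rowLabels ≠ [] then
        let first := qlabel ++ g rowLabels 0 ++ g colLabels 0
        let lastc := g colLabels (-1)
        rowLabels.map (fun r => "!DUPCHK " ++ first ++ " TO " ++ qlabel ++ r ++ lastc ++ ".\n")
      else
        ["!DUPCHK " ++ qlabel ++ g colLabels 0 ++ " TO " ++ qlabel ++ g colLabels (-1) ++ ".\n"]
    else []
  String.join parts

-- ===== PRECONDITION & SPEC =====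
-- Pre_ excludes exactly the inputs on which A raises IndexError (uniqueList[0] of an empty list):
-- option 'cols' with empty rowLabels, and option 'rows' with empty colLabels. B raises there too.
def Pre_selectUnique (qlabel : String) (rowLabels : List String) (colLabels : List String) (option : String) : Prop :=
  (option = "cols" → rowLabels ≠ []) ∧ (option = "rows" → colLabels ≠ [])
instance (qlabel : String) (rowLabels : List String) (colLabels : List String) (option : String) : Decidable (Pre_selectUnique qlabel rowLabels colLabels option) := by unfold Pre_selectUnique; infer_instance

def pvWitness_selectUnique : String × List String × List String × String := ("Q", ["r1", "r2"], ["c1", "c2"], "cols")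

def Spec_selectUnique (qlabel : String) (rowLabels : List String) (colLabels : List String) (option : String) (out : String) : Prop := out = selectUnique_alt qlabel rowLabels colLabels option
instance (qlabel : String) (rowLabels : List String) (colLabels : List String) (option : String) (out : String) : Decidable (Spec_selectUnique qlabel rowLabels colLabels option out) := by unfold Spec_selectUnique; infer_instance

-- ===== CLAIM (what is proved, stated in full; the proofs are below) =====
def Claim_equal_selectUnique : Prop := ∀ (qlabel : String) (rowLabels : List String) (colLabels : List String) (option : String), Dom_selectUnique qlabel rowLabels colLabels option → Pre_selectUnique qlabel rowLabels colLabels option → Spec_selectUnique qlabel rowLabels colLabels option (selectUnique qlabel rowLabels colLabels option)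

-- ===== LEMMAS AND PROOFS =====

theorem join_cons (a : String) (l : List String) : String.join (a :: l) = a ++ String.join l := by
  have h : ∀ (l : List String) (a : String),
      l.foldl (fun r s => r ++ s) a = a ++ l.foldl (fun r s => r ++ s) "" := by
    intro l
    induction l with
    | nil => intro a; simp
    | cons x xs ih =>
      intro a
      simp only [List.foldl_cons]
      rw [ih (a ++ x), ih ("" ++ x), String.empty_append, String.append_assoc]
  simp only [String.join, List.foldl_cons]
  rw [h l ("" ++ a), String.empty_append]

theorem head?_append_of_some {α : Type} (l l' : List α) (a : α) (h : l.head? = some a) :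
    (l ++ l').head? = some a := by
  cases l <;> simp_all

theorem pyGet?_zero_head (xs : List String) : PySem.List.pyGet? xs 0 = xs.head? := by
  simp [PySem.List.pyGet?_zero, List.head?_eq_getElem?]

-- A's outer loop, abstracted over which list is outer/inner (mk inner-elem outer-elem = label)
theorem selectUnique_loop (first lastv : String) (inner : List String)
    (hlast : inner.getLast? = some lastv)
    (mk : String → String → String) (outer : List String) :
    ∀ (ul : List String) (s : String), ul.head? = some first →
      (outer.foldl (fun (st : List String × String) o =>
        let ul' := inner.foldl (fun u x => u ++ [mk x o]) st.1
        let setVars := ((PySem.List.pyGet? ul' 0).getD "") ++ " TO " ++ ((PySem.List.pyGet? ul' (-1)).getD "")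
        (ul', st.2 ++ ("!DUPCHK " ++ setVars ++ ".\n"))) (ul, s)).2 =
      s ++ String.join (outer.map (fun o => "!DUPCHK " ++ (first ++ " TO " ++ mk lastv o) ++ ".\n")) := by
  have hin : inner ≠ [] := by intro hn; simp [hn] at hlast
  induction outer with
  | nil => intro ul s h; simp [String.join]
  | cons o os ih =>
    intro ul s h
    simp only [List.foldl_cons, List.map_cons]
    rw [join_cons]
    have hmapne : inner.map (fun x => mk x o) ≠ [] := by simpa using hin
    have hfold : inner.foldl (fun u x => u ++ [mk x o]) ul = ul ++ inner.map (fun x => mk x o) :=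
      PySem.List.foldl_append_singleton_eq_map ..
    have hhead : (inner.foldl (fun u x => u ++ [mk x o]) ul).head? = some first := by
      rw [hfold]; exact head?_append_of_some _ _ _ h
    have hlast' : (inner.foldl (fun u x => u ++ [mk x o]) ul).getLast? = some (mk lastv o) := by
      rw [hfold, List.getLast?_append_of_ne_nil _ hmapne, List.getLast?_map, hlast]; rfl
    rw [ih _ _ hhead]
    rw [pyGet?_zero_head, hhead, PySem.List.pyGet?_neg_one, hlast']
    simp [String.append_assoc]

-- ===== VERDICT (by name: the statement is the Claim_ definition above) =====
theorem selectUnique_spec : Claim_equal_selectUnique := by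
  intro qlabel rowLabels colLabels option _ hpre
  unfold Spec_selectUnique selectUnique selectUnique_alt
  obtain ⟨hc, hr⟩ := hpre
  by_cases hoc : option = "cols"
  · subst hoc
    have hrow := hc rfl
    obtain ⟨r0, rtl, hrtl⟩ := List.exists_cons_of_ne_nil hrow
    have hheadr : rowLabels.head? = some r0 := by rw [hrtl]; rfl
    have hlastr : rowLabels.getLast? = some (rowLabels.getLast hrow) := List.getLast?_eq_some_getLast ..
    by_cases hcol : colLabels = []
    · subst hcol
      have hfold : rowLabels.foldl (fun u r => u ++ [qlabel ++ r]) [] = rowLabels.map (fun r => qlabel ++ r) :=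
        PySem.List.foldl_append_singleton_eq_map ..
      have hhead : (rowLabels.map (fun r => qlabel ++ r)).head? = some (qlabel ++ r0) := by
        rw [hrtl]; rfl
      have hlast : (rowLabels.map (fun r => qlabel ++ r)).getLast? = some (qlabel ++ rowLabels.getLast hrow) := by
        rw [List.getLast?_map, hlastr]; rfl
      simp only [ne_eq, not_true_eq_false, if_false, reduceIte]
      rw [hfold, pyGet?_zero_head, hhead, PySem.List.pyGet?_neg_one, hlast,
          pyGet?_zero_head, hheadr, PySem.List.pyGet?_neg_one, hlastr]
      simp [String.join, String.append_assoc]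
    · obtain ⟨c0, cs, hct⟩ := List.exists_cons_of_ne_nil hcol
      subst hct
      simp only [ne_eq, reduceCtorEq, not_false_eq_true, if_true, List.foldl_cons,
        List.map_cons]
      -- first outer step by hand
      have hfold : rowLabels.foldl (fun u r => u ++ [qlabel ++ r ++ c0]) [] =
          rowLabels.map (fun r => qlabel ++ r ++ c0) := by
        have := PySem.List.foldl_append_singleton_eq_map (l := rowLabels)
          (f := fun r => qlabel ++ r ++ c0) (acc := [])
        simpa using this
      have hhead : (rowLabels.map (fun r => qlabel ++ r ++ c0)).head? = some (qlabel ++ r0 ++ c0) := by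
        rw [hrtl]; rfl
      have hlast : (rowLabels.map (fun r => qlabel ++ r ++ c0)).getLast? =
          some (qlabel ++ rowLabels.getLast hrow ++ c0) := by
        rw [List.getLast?_map, hlastr]; rfl
      rw [hfold, pyGet?_zero_head, hhead, PySem.List.pyGet?_neg_one, hlast]
      rw [selectUnique_loop (qlabel ++ r0 ++ c0) (rowLabels.getLast hrow) rowLabels hlastr
        (fun r c => qlabel ++ r ++ c) cs _ _ hhead]
      rw [join_cons]
      simp [pyGet?_zero_head, PySem.List.pyGet?_neg_one, hheadr, hlastr, String.append_assoc]
  · by_cases hor : option = "rows"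
    · subst hor
      have hcolne := hr rfl
      obtain ⟨c0, ctl, hctl⟩ := List.exists_cons_of_ne_nil hcolne
      have hheadc : colLabels.head? = some c0 := by rw [hctl]; rfl
      have hlastc : colLabels.getLast? = some (colLabels.getLast hcolne) := List.getLast?_eq_some_getLast ..
      have hne : "rows" ≠ "cols" := by decide
      by_cases hrowe : rowLabels = []
      · subst hrowe
        have hfold : colLabels.foldl (fun u c => u ++ [qlabel ++ c]) [] = colLabels.map (fun c => qlabel ++ c) :=
          PySem.List.foldl_append_singleton_eq_map ..
        have hhead : (colLabels.map (fun c => qlabel ++ c)).head? = some (qlabel ++ c0) := by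
          rw [hctl]; rfl
        have hlast : (colLabels.map (fun c => qlabel ++ c)).getLast? = some (qlabel ++ colLabels.getLast hcolne) := by
          rw [List.getLast?_map, hlastc]; rfl
        simp only [if_neg hne, ne_eq, not_true_eq_false, if_false, reduceIte]
        rw [hfold, pyGet?_zero_head, hhead, PySem.List.pyGet?_neg_one, hlast,
            pyGet?_zero_head, hheadc, PySem.List.pyGet?_neg_one, hlastc]
        simp [String.join, String.append_assoc]
      · obtain ⟨r0, rs, hrt⟩ := List.exists_cons_of_ne_nil hrowe
        subst hrt
        simp only [if_neg hne, ne_eq, reduceCtorEq, not_false_eq_true, if_true,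
          List.foldl_cons, List.map_cons]
        have hfold : colLabels.foldl (fun u c => u ++ [qlabel ++ r0 ++ c]) [] =
            colLabels.map (fun c => qlabel ++ r0 ++ c) := by
          have := PySem.List.foldl_append_singleton_eq_map (l := colLabels)
            (f := fun c => qlabel ++ r0 ++ c) (acc := [])
          simpa using this
        have hhead : (colLabels.map (fun c => qlabel ++ r0 ++ c)).head? = some (qlabel ++ r0 ++ c0) := by
          rw [hctl]; rfl
        have hlast : (colLabels.map (fun c => qlabel ++ r0 ++ c)).getLast? =
            some (qlabel ++ r0 ++ colLabels.getLast hcolne) := by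
          rw [List.getLast?_map, hlastc]; rfl
        rw [hfold, pyGet?_zero_head, hhead, PySem.List.pyGet?_neg_one, hlast]
        rw [selectUnique_loop (qlabel ++ r0 ++ c0) (colLabels.getLast hcolne) colLabels hlastc
          (fun c r => qlabel ++ r ++ c) rs _ _ hhead]
        rw [join_cons]
        simp [pyGet?_zero_head, PySem.List.pyGet?_neg_one, hheadc, hlastc, String.append_assoc]
    · simp [if_neg hoc, if_neg hor, String.join]
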